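-- pv_equiv track=rewrite | github.com/kodych/cauldron | cauldron/report.py | _compress_ip_list
-- ===== SOURCE A (Python) =====
-- def _compress_ip_list(ips: list[str]) -> str:
--     """Compact IP list into readable ranges, keeping every address.
--
--     Example:
--         ["10.0.0.1", "10.0.0.2", "10.0.0.3", "10.0.1.4"]
--         → "10.0.0.1-3, 10.0.1.4"
--
--     This lets a report show 42 affected hosts in one line when they sit in
--     dense subnets without dropping any IP. Non-IPv4 strings are passed
--     through unchanged (sorted at the end).
--     """
--     if not ips:
--         return ""
--     groups: dict[str, list[int]] = {}
--     extras: list[str] = []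
--     for ip in ips:
--         parts = ip.split(".")
--         if len(parts) != 4:
--             extras.append(ip)
--             continue
--         try:
--             last = int(parts[3])
--         except ValueError:
--             extras.append(ip)
--             continue
--         prefix = ".".join(parts[:3])
--         groups.setdefault(prefix, []).append(last)
--
--     def _prefix_key(p: str) -> tuple[int, ...]:
--         try:
--             return tuple(int(x) for x in p.split("."))
--         except ValueError:
--             return (0,)
--
--     tokens: list[str] = []
--     for prefix in sorted(groups.keys(), key=_prefix_key):
--         octets = sorted(set(groups[prefix]))
--         i = 0
--         while i < len(octets):
--             j = i
--             while j + 1 < len(octets) and octets[j + 1] == octets[j] + 1: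
--                 j += 1
--             if j > i:
--                 tokens.append(f"{prefix}.{octets[i]}-{octets[j]}")
--             else:
--                 tokens.append(f"{prefix}.{octets[i]}")
--             i = j + 1
--     tokens.extend(sorted(extras))
--     return ", ".join(tokens)
-- ===== SOURCE B (Python) =====
-- def _prefix_key(p):
--     try:
--         return tuple(int(x) for x in p.split("."))
--     except ValueError:
--         return (0,)
--
--
-- def _compress_ip_list(ips: list[str]) -> str:
--     """Compact IP list into readable ranges, keeping every address."""
--     groups = {}  # prefix -> set of last octets
--     extras = []
--     for ip in ips:
--         parts = ip.split(".")
--         last = None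
--         if len(parts) == 4:
--             try:
--                 last = int(parts[3])
--             except ValueError:
--                 pass
--         if last is None:
--             extras.append(ip)
--         else:
--             groups.setdefault(".".join(parts[:3]), set()).add(last)
--     tokens = []
--     for prefix in sorted(groups, key=_prefix_key):
--         s = groups[prefix]
--         # Run boundaries by set membership: v starts a run iff v-1 is absent,
--         # ends one iff v+1 is absent; runs are disjoint intervals, so the
--         # ascending starts pair up with the ascending ends one-to-one.
--         starts = sorted(v for v in s if v - 1 not in s)
--         ends = sorted(v for v in s if v + 1 not in s)
--         tokens += [
--             f"{prefix}.{a}-{b}" if b > a else f"{prefix}.{a}"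
--             for a, b in zip(starts, ends)
--         ]
--     return ", ".join(tokens + sorted(extras))
-- ===== Notes on version B (the rewrite author's own statement) =====
-- stated objective: alternative
-- what changed: Run detection no longer scans the sorted octet list with nested index loops: B collects each prefix's last octets in a set and finds run boundaries by membership alone (v starts a run iff v-1 is not in the set, ends one iff v+1 is not), then zips the sorted starts with the sorted ends to emit the tokens.
import Mathlib
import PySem

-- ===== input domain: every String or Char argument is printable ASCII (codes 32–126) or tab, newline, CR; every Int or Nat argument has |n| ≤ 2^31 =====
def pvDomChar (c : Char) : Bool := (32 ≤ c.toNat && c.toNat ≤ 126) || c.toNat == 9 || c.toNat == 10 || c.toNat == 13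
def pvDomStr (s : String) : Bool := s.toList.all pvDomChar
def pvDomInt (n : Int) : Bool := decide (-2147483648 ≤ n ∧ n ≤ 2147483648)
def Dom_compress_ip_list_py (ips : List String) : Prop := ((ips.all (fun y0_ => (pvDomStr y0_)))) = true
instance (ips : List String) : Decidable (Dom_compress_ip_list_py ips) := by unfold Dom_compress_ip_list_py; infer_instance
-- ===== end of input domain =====

-- B replaces A's nested index-scanning while-loops over the sorted octets with
-- set-membership boundary detection (v starts a run iff v-1 is absent, ends one iff
-- v+1 is absent) and zips the sorted starts with the sorted ends; objective:
-- alternative algorithm for the run collapsing (no speed claim).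

-- ===== PORT A =====

-- ip.split(".") with the non-empty separator "." : split? is never none, so getD [] is exact
def pvSplitDot (s : String) : List String := (PySem.Str.split? s ".").getD []

-- the `_prefix_key` helper (textually identical in Source A and Source B)
def pvPrefixKey (p : String) : List Int :=
  match (pvSplitDot p).mapM PySem.Int.ofStr? with
  | some ks => ks
  | none => [0]

-- loop body of A's first `for ip in ips` loop (dict of lists + extras)
def pvStepA (acc : PySem.Dict String (List Int) × List String) (ip : String) :
    PySem.Dict String (List Int) × List String :=
  let parts := pvSplitDot ip
  if parts.length ≠ 4 then (acc.1, acc.2 ++ [ip])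
  else
    match PySem.Int.ofStr? (parts.getD 3 "") with  -- parts[3]: in range, length = 4
    | none => (acc.1, acc.2 ++ [ip])
    | some last =>
        (acc.1.modify (PySem.Str.join "." (parts.take 3)) [] (fun l => l ++ [last]), acc.2)

-- the inner `while j + 1 < len(octets) and octets[j + 1] == octets[j] + 1` loop
def pvInnerJ (octets : List Int) (j : Nat) : Nat :=
  if h : j + 1 < octets.length ∧ octets.getD (j + 1) 0 = octets.getD j 0 + 1 then
    pvInnerJ octets (j + 1)
  else j
termination_by octets.length - j
decreasing_by omega

theorem pvInnerJ_ge (octets : List Int) (j : Nat) : j ≤ pvInnerJ octets j := by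
  fun_induction pvInnerJ octets j with
  | case1 j h ih => omega
  | case2 j h => omega

-- the outer `while i < len(octets)` loop appending tokens
def pvOuterLoop (pfx : String) (octets : List Int) (i : Nat) (toks : List String) :
    List String :=
  if h : i < octets.length then
    let j := pvInnerJ octets i
    let toks' := toks ++
      [if j > i then
          pfx ++ "." ++ PySem.Int.toStr (octets.getD i 0) ++ "-" ++ PySem.Int.toStr (octets.getD j 0)
        else pfx ++ "." ++ PySem.Int.toStr (octets.getD i 0)]
    pvOuterLoop pfx octets (j + 1) toks'
  else toks
termination_by octets.length - i
decreasing_by have := pvInnerJ_ge octets i; omega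

def compress_ip_list_py (ips : List String) : String :=
  if ips = [] then ""
  else
    let st := ips.foldl pvStepA (PySem.Dict.empty, [])
    let tokens := (PySem.List.sorted st.1.keys pvPrefixKey).foldl
      (fun toks pfx =>
        let octets := PySem.List.sorted (PySem.Set.ofList (st.1.getD pfx [])) (fun x => x)
        pvOuterLoop pfx octets 0 toks) []
    let tokens := tokens ++ PySem.List.sorted st.2 (fun x => x)
    PySem.Str.join ", " tokens

-- ===== PORT B =====

-- loop body of Source B's `for ip in ips` loop (dict of sets + extras; the try/int is ofStr?)
def pvStepB (acc : PySem.Dict String (PySem.Set Int) × List String) (ip : String) :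
    PySem.Dict String (PySem.Set Int) × List String :=
  let parts := pvSplitDot ip
  match (if parts.length = 4 then PySem.Int.ofStr? (parts.getD 3 "") else none) with
  | none => (acc.1, acc.2 ++ [ip])
  | some last =>
      (acc.1.modify (PySem.Str.join "." (parts.take 3)) PySem.Set.empty
        (fun s => PySem.Set.add s last), acc.2)

-- Source B's per-prefix body: sorted(v for v in s if v-1 not in s), sorted(v for v in s
-- if v+1 not in s), zipped.  The generators iterate over the set, but sorted with no
-- key makes the result independent of that order (elements are distinct), so the
-- filter over the Set's underlying list is exact.
def pvRunsB (pfx : String) (s : PySem.Set Int) : List String :=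
  let starts := PySem.List.sorted (s.filter (fun v => !(PySem.Set.contains s (v - 1)))) (fun x => x)
  let ends := PySem.List.sorted (s.filter (fun v => !(PySem.Set.contains s (v + 1)))) (fun x => x)
  (starts.zip ends).map (fun p =>
    if p.2 > p.1 then pfx ++ "." ++ PySem.Int.toStr p.1 ++ "-" ++ PySem.Int.toStr p.2
    else pfx ++ "." ++ PySem.Int.toStr p.1)

def compress_ip_list_py_alt (ips : List String) : String :=
  let st := ips.foldl pvStepB (PySem.Dict.empty, [])
  let tokens := (PySem.List.sorted st.1.keys pvPrefixKey).foldl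
    (fun toks pfx => toks ++ pvRunsB pfx (st.1.getD pfx [])) []
  PySem.Str.join ", " (tokens ++ PySem.List.sorted st.2 (fun x => x))

-- ===== PRECONDITION & SPEC =====
def Spec_compress_ip_list_py (ips : List String) (out : String) : Prop := out = compress_ip_list_py_alt ips
instance (ips : List String) (out : String) : Decidable (Spec_compress_ip_list_py ips out) := by unfold Spec_compress_ip_list_py; infer_instance

-- ===== CLAIM (what is proved, stated in full; the proofs are below) =====
def Claim_equal_compress_ip_list_py : Prop := ∀ (ips : List String), Dom_compress_ip_list_py ips → Spec_compress_ip_list_py ips (compress_ip_list_py ips)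

-- ===== LEMMAS AND PROOFS =====

-- common specification of both run-collapsing passes: the (first, last) pair of every
-- maximal run of consecutive values, and the token rendered from such a pair
def pvRunsPairs1 (f l : Int) : List Int → List (Int × Int)
  | [] => [(f, l)]
  | y :: ys => if y = l + 1 then pvRunsPairs1 f y ys else (f, l) :: pvRunsPairs1 y y ys

def pvRunsPairs : List Int → List (Int × Int)
  | [] => []
  | x :: xs => pvRunsPairs1 x x xs

def pvFmt (pfx : String) (p : Int × Int) : String :=
  if p.1 < p.2 then pfx ++ "." ++ PySem.Int.toStr p.1 ++ "-" ++ PySem.Int.toStr p.2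
  else pfx ++ "." ++ PySem.Int.toStr p.1

-- ---- A side: the index loops compute pvRunsPairs ----

theorem pvH (octets : List Int) :
    ∀ (n j : Nat) (f : Int), octets.length - j = n → j < octets.length →
      pvRunsPairs1 f (octets.getD j 0) (octets.drop (j + 1))
          = (f, octets.getD (pvInnerJ octets j) 0)
              :: pvRunsPairs (octets.drop (pvInnerJ octets j + 1))
        ∧ octets.getD (pvInnerJ octets j) 0
            = octets.getD j 0 + ((pvInnerJ octets j - j : Nat) : Int) := by
  intro n
  induction n using Nat.strong_induction_on with
  | _ n IH =>
    intro j f hn hj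
    rw [pvInnerJ]
    split
    · next h =>
      have hstep := IH (octets.length - (j + 1)) (by omega) (j + 1) f rfl h.1
      have hge := pvInnerJ_ge octets (j + 1)
      have hdrop : octets.drop (j + 1) = octets.getD (j + 1) 0 :: octets.drop (j + 2) := by
        rw [List.getD_eq_getElem _ _ h.1]
        exact List.drop_eq_getElem_cons h.1
      refine ⟨?_, by omega⟩
      rw [hdrop, pvRunsPairs1, if_pos h.2]
      exact hstep.1
    · next h =>
      refine ⟨?_, by simp⟩
      by_cases hlen : j + 1 < octets.length
      · have hne : ¬ octets.getD (j + 1) 0 = octets.getD j 0 + 1 := fun hc => h ⟨hlen, hc⟩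
        have hdrop : octets.drop (j + 1) = octets.getD (j + 1) 0 :: octets.drop (j + 2) := by
          rw [List.getD_eq_getElem _ _ hlen]
          exact List.drop_eq_getElem_cons hlen
        rw [hdrop, pvRunsPairs1, if_neg hne, pvRunsPairs]
      · have hnil : octets.drop (j + 1) = [] := List.drop_eq_nil_of_le (by omega)
        rw [hnil, pvRunsPairs1, pvRunsPairs]

theorem pvLA (pfx : String) (octets : List Int) :
    ∀ (n i : Nat) (toks : List String), octets.length - i = n →
      pvOuterLoop pfx octets i toks
        = toks ++ (pvRunsPairs (octets.drop i)).map (pvFmt pfx) := by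
  intro n
  induction n using Nat.strong_induction_on with
  | _ n IH =>
    intro i toks hn
    rw [pvOuterLoop]
    split
    · next hi =>
      have hH := pvH octets (octets.length - i) i (octets.getD i 0) rfl hi
      have hge := pvInnerJ_ge octets i
      have hdrop : octets.drop i = octets.getD i 0 :: octets.drop (i + 1) := by
        rw [List.getD_eq_getElem _ _ hi]
        exact List.drop_eq_getElem_cons hi
      have hpairs : pvRunsPairs (octets.drop i)
          = (octets.getD i 0, octets.getD (pvInnerJ octets i) 0)
              :: pvRunsPairs (octets.drop (pvInnerJ octets i + 1)) := by
        rw [hdrop, pvRunsPairs]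
        exact hH.1
      rw [IH (octets.length - (pvInnerJ octets i + 1)) (by omega) _ _ rfl, hpairs]
      simp only [List.map_cons, List.append_assoc, List.singleton_append]
      congr 2
      by_cases hij : i < pvInnerJ octets i
      · have hlt : octets.getD i 0 < octets.getD (pvInnerJ octets i) 0 := by
          have := hH.2; omega
        rw [if_pos hij, pvFmt, if_pos hlt]
      · have heq : pvInnerJ octets i = i := by omega
        have hnlt : ¬ octets.getD i 0 < octets.getD (pvInnerJ octets i) 0 := by
          rw [heq]; omega
        rw [if_neg hij, pvFmt, if_neg hnlt]
    · next hi =>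
      have hnil : octets.drop i = [] := List.drop_eq_nil_of_le (by omega)
      rw [hnil, pvRunsPairs]
      simp

-- ---- B side: membership-boundary filters compute the starts/ends of pvRunsPairs ----

-- starts within a suffix: v-1 absent from the whole tail l :: xs
theorem pvSL1 (xs : List Int) : ∀ (f l : Int), (l :: xs).Pairwise (· < ·) →
    (pvRunsPairs1 f l xs).map Prod.fst
      = f :: xs.filter (fun v => !(decide (v - 1 ∈ l :: xs))) := by
  induction xs with
  | nil => intro f l _; simp [pvRunsPairs1]
  | cons y ys ih =>
    intro f l hp
    have hly : l < y := (List.pairwise_cons.mp hp).1 y (by simp)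
    have hyys : (y :: ys).Pairwise (· < ·) := (List.pairwise_cons.mp hp).2
    have hys : ∀ v ∈ ys, y < v := (List.pairwise_cons.mp hyys).1
    have hcongr : ∀ v ∈ ys,
        (!(decide (v - 1 ∈ l :: y :: ys))) = (!(decide (v - 1 ∈ y :: ys))) := by
      intro v hv
      have := hys v hv
      simp only [List.mem_cons]
      have : ¬ v - 1 = l := by omega
      simp [this]
    rw [pvRunsPairs1]
    by_cases hy : y = l + 1
    · rw [if_pos hy, ih f y hyys]
      have hdrop : (!(decide (y - 1 ∈ l :: y :: ys))) = false := by
        have : y - 1 = l := by omega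
        simp [this]
      simp only [List.filter_cons, hdrop]
      rw [List.filter_congr hcongr]
      simp
    · rw [if_neg hy, List.map_cons, ih y y hyys]
      have hkeep : (!(decide (y - 1 ∈ l :: y :: ys))) = true := by
        have h1 : ¬ y - 1 = l := by omega
        have h2 : ¬ y - 1 = y := by omega
        have h3 : ¬ y - 1 ∈ ys := fun hc => by have := hys _ hc; omega
        simp [h1, h2, h3]
      simp only [List.filter_cons, hkeep]
      rw [List.filter_congr hcongr]
      simp

-- ends: v+1 absent from the whole tail l :: xs
theorem pvEL1 (xs : List Int) : ∀ (f l : Int), (l :: xs).Pairwise (· < ·) →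
    (pvRunsPairs1 f l xs).map Prod.snd
      = (l :: xs).filter (fun v => !(decide (v + 1 ∈ l :: xs))) := by
  induction xs with
  | nil => intro f l _; simp [pvRunsPairs1]
  | cons y ys ih =>
    intro f l hp
    have hly : l < y := (List.pairwise_cons.mp hp).1 y (by simp)
    have hyys : (y :: ys).Pairwise (· < ·) := (List.pairwise_cons.mp hp).2
    have hys : ∀ v ∈ ys, y < v := (List.pairwise_cons.mp hyys).1
    have hcongr : ∀ v ∈ y :: ys,
        (!(decide (v + 1 ∈ l :: y :: ys))) = (!(decide (v + 1 ∈ y :: ys))) := by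
      intro v hv
      have hvy : y ≤ v := by
        rcases List.mem_cons.mp hv with h | h
        · omega
        · have := hys v h; omega
      simp only [List.mem_cons]
      have : ¬ v + 1 = l := by omega
      simp [this]
    rw [pvRunsPairs1]
    by_cases hy : y = l + 1
    · rw [if_pos hy, ih f y hyys]
      have hdrop : (!(decide (l + 1 ∈ l :: y :: ys))) = false := by
        have : l + 1 = y := by omega
        simp [this]
      conv_rhs => rw [List.filter_cons]
      rw [hdrop]
      simp only [Bool.false_eq_true, if_false]
      rw [List.filter_congr hcongr]
    · rw [if_neg hy, List.map_cons, ih y y hyys]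
      have hkeep : (!(decide (l + 1 ∈ l :: y :: ys))) = true := by
        have h1 : ¬ l + 1 = l := by omega
        have h2 : ¬ l + 1 = y := fun hc => hy (by omega)
        have h3 : ¬ l + 1 ∈ ys := fun hc => by
          have := hys _ hc; omega
        simp [h1, h2, h3]
      conv_rhs => rw [List.filter_cons]
      rw [hkeep]
      simp only [if_true]
      rw [List.filter_congr hcongr]

theorem pvZipFstSnd (l : List (Int × Int)) :
    (l.map Prod.fst).zip (l.map Prod.snd) = l := by
  induction l with
  | nil => rfl
  | cons p ps ih => simp [ih]

-- the B-side per-prefix body equals the common run specification on a Nodup set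
theorem pvLB (pfx : String) (s : PySem.Set Int) (hs : s.Nodup) :
    pvRunsB pfx s
      = (pvRunsPairs (PySem.List.sorted s (fun x => x))).map (pvFmt pfx) := by
  set t := PySem.List.sorted s (fun x => x) with ht
  have hperm : t.Perm s := PySem.List.sorted_perm s (fun x => x) false
  have hnd : t.Nodup := hperm.nodup_iff.mpr hs
  have hle : t.Pairwise (fun a b => a ≤ b) := PySem.List.sorted_pairwise s (fun x => x)
  have hlt : t.Pairwise (· < ·) := by
    have := hle.and hnd
    exact this.imp (fun h => lt_of_le_of_ne h.1 h.2)
  have hmem : ∀ x : Int, (x ∈ s) ↔ (x ∈ t) := fun x => (hperm.mem_iff).symm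
  -- the two sorted filters over the set are the same filters over the sorted list t
  have hfilt : ∀ (p : Int → Bool),
      PySem.List.sorted (s.filter p) (fun x => x) = t.filter p := by
    intro p
    apply PySem.List.sorted_eq_of_perm_of_pairwise_lt
    · exact hperm.filter p
    · exact hlt.filter p
  have hcontains : ∀ x : Int, PySem.Set.contains s x = decide (x ∈ t) := by
    intro x
    simp only [PySem.Set.contains_eq_listContains]
    by_cases hx : x ∈ t
    · simp [hx, (hmem x).mpr hx]
    · have : ¬ x ∈ s := fun hc => hx ((hmem x).mp hc)
      simp [hx, this]
  have hpred1 : (fun v => !(PySem.Set.contains s (v - 1)))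
      = fun v => !(decide (v - 1 ∈ t)) := funext fun v => by rw [hcontains]
  have hpred2 : (fun v => !(PySem.Set.contains s (v + 1)))
      = fun v => !(decide (v + 1 ∈ t)) := funext fun v => by rw [hcontains]
  show ((PySem.List.sorted (s.filter _) _).zip (PySem.List.sorted (s.filter _) _)).map _ = _
  rw [hpred1, hpred2, hfilt, hfilt]
  cases htc : t with
  | nil => simp [pvRunsPairs]
  | cons x xs =>
    have hlt' : (x :: xs).Pairwise (· < ·) := htc ▸ hlt
    have hxs : ∀ v ∈ xs, x < v := (List.pairwise_cons.mp hlt').1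
    have hstart : (x :: xs).filter (fun v => !(decide (v - 1 ∈ x :: xs)))
        = x :: xs.filter (fun v => !(decide (v - 1 ∈ x :: xs))) := by
      have hkeep : (!(decide (x - 1 ∈ x :: xs))) = true := by
        have h1 : ¬ x - 1 = x := by omega
        have h2 : ¬ x - 1 ∈ xs := fun hc => by have := hxs _ hc; omega
        simp [h1, h2]
      rw [List.filter_cons, hkeep]
      simp
    rw [hstart, ← pvSL1 xs x x hlt', ← pvEL1 xs x x hlt']
    rw [show pvRunsPairs1 x x xs = pvRunsPairs (x :: xs) from rfl, pvZipFstSnd]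
    apply List.map_congr_left
    intro p _
    simp only [pvFmt]

-- ---- phase 1: dict-of-lists vs dict-of-sets ----

theorem pvOfList_append (l : List Int) (x : Int) :
    PySem.Set.ofList (l ++ [x]) = PySem.Set.add (PySem.Set.ofList l) x := by
  rw [PySem.Set.ofList_eq_foldl, PySem.Set.ofList_eq_foldl, List.foldl_append]
  rfl

theorem pvPhase1 (ips : List String) :
    ∀ (dA : PySem.Dict String (List Int)) (dB : PySem.Dict String (PySem.Set Int))
      (ex : List String),
      dA.keys = dB.keys → (∀ k, dB.getD k [] = PySem.Set.ofList (dA.getD k [])) →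
      (ips.foldl pvStepA (dA, ex)).2 = (ips.foldl pvStepB (dB, ex)).2
      ∧ (ips.foldl pvStepA (dA, ex)).1.keys = (ips.foldl pvStepB (dB, ex)).1.keys
      ∧ ∀ k, (ips.foldl pvStepB (dB, ex)).1.getD k []
              = PySem.Set.ofList ((ips.foldl pvStepA (dA, ex)).1.getD k []) := by
  induction ips with
  | nil => intro dA dB ex h1 h2; exact ⟨rfl, h1, h2⟩
  | cons ip rest ih =>
    intro dA dB ex hkeys hval
    simp only [List.foldl_cons]
    by_cases h4 : (pvSplitDot ip).length = 4
    · have hlt : 3 < (pvSplitDot ip).length := by omega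
      cases hparse : PySem.Int.ofStr? ((pvSplitDot ip).getD 3 "") with
      | none =>
        rw [List.getD_eq_getElem _ _ hlt] at hparse
        have hA : pvStepA (dA, ex) ip = (dA, ex ++ [ip]) := by simp [pvStepA, h4, hparse]
        have hB : pvStepB (dB, ex) ip = (dB, ex ++ [ip]) := by simp [pvStepB, h4, hparse]
        rw [hA, hB]
        exact ih dA dB (ex ++ [ip]) hkeys hval
      | some last =>
        rw [List.getD_eq_getElem _ _ hlt] at hparse
        have hA : pvStepA (dA, ex) ip
            = (dA.modify (PySem.Str.join "." ((pvSplitDot ip).take 3)) []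
                (fun l => l ++ [last]), ex) := by
          simp [pvStepA, h4, hparse]
        have hB : pvStepB (dB, ex) ip
            = (dB.modify (PySem.Str.join "." ((pvSplitDot ip).take 3)) []
                (fun s => PySem.Set.add s last), ex) := by
          simp [pvStepB, h4, hparse]
        rw [hA, hB]
        apply ih
        · rw [PySem.Dict.keys_modify, PySem.Dict.keys_modify]
          by_cases hc : (PySem.Str.join "." ((pvSplitDot ip).take 3)) ∈ dA.keys
          · have hcA : dA.contains (PySem.Str.join "." ((pvSplitDot ip).take 3)) = true := by
              rw [PySem.Dict.contains_eq_decide_mem_keys]; exact decide_eq_true hc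
            have hcB : dB.contains (PySem.Str.join "." ((pvSplitDot ip).take 3)) = true := by
              rw [PySem.Dict.contains_eq_decide_mem_keys, ← hkeys]; exact decide_eq_true hc
            rw [PySem.Dict.keys_insert_of_contains _ _ hcA,
                PySem.Dict.keys_insert_of_contains _ _ hcB]
            exact hkeys
          · have hcA : dA.contains (PySem.Str.join "." ((pvSplitDot ip).take 3)) = false := by
              rw [PySem.Dict.contains_eq_decide_mem_keys]; exact decide_eq_false hc
            have hcB : dB.contains (PySem.Str.join "." ((pvSplitDot ip).take 3)) = false := by
              rw [PySem.Dict.contains_eq_decide_mem_keys, ← hkeys]; exact decide_eq_false hc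
            rw [PySem.Dict.keys_insert_of_not_contains _ _ hcA,
                PySem.Dict.keys_insert_of_not_contains _ _ hcB, hkeys]
        · intro k
          rw [PySem.Dict.getD_modify, PySem.Dict.getD_modify]
          by_cases hk : k = PySem.Str.join "." ((pvSplitDot ip).take 3)
          · rw [if_pos hk, if_pos hk, hval _, pvOfList_append]
          · rw [if_neg hk, if_neg hk]
            exact hval k
    · have hA : pvStepA (dA, ex) ip = (dA, ex ++ [ip]) := by simp [pvStepA, h4]
      have hB : pvStepB (dB, ex) ip = (dB, ex ++ [ip]) := by simp [pvStepB, h4]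
      rw [hA, hB]
      exact ih dA dB (ex ++ [ip]) hkeys hval

-- ===== VERDICT (by name: the statement is the Claim_ definition above) =====
theorem compress_ip_list_py_spec : Claim_equal_compress_ip_list_py := by
  intro ips _
  show compress_ip_list_py ips = compress_ip_list_py_alt ips
  by_cases hnil : ips = []
  · subst hnil; rfl
  · obtain ⟨hex, hkeys, hval⟩ := pvPhase1 ips PySem.Dict.empty PySem.Dict.empty []
      rfl
      (fun k => rfl)
    simp only [compress_ip_list_py, compress_ip_list_py_alt, if_neg hnil]
    congr 1
    rw [← hex]
    congr 1
    have hfunA : (fun (toks : List String) (pfx : String) =>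
        pvOuterLoop pfx
          (PySem.List.sorted
            (PySem.Set.ofList ((ips.foldl pvStepA (PySem.Dict.empty, [])).1.getD pfx []))
            (fun x => x)) 0 toks)
        = fun toks pfx => toks ++
            (pvRunsPairs (PySem.List.sorted
              (PySem.Set.ofList ((ips.foldl pvStepA (PySem.Dict.empty, [])).1.getD pfx []))
              (fun x => x))).map (pvFmt pfx) :=
      funext fun toks => funext fun pfx => pvLA pfx _ _ 0 toks rfl
    have hfunB : (fun (toks : List String) (pfx : String) =>
        toks ++ pvRunsB pfx ((ips.foldl pvStepB (PySem.Dict.empty, [])).1.getD pfx []))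
        = fun toks pfx => toks ++
            (pvRunsPairs (PySem.List.sorted
              (PySem.Set.ofList ((ips.foldl pvStepA (PySem.Dict.empty, [])).1.getD pfx []))
              (fun x => x))).map (pvFmt pfx) := by
      funext toks pfx
      rw [hval pfx, pvLB pfx _ (PySem.Set.nodup_ofList _)]
    rw [hfunA, hfunB, hkeys]
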